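-- pv_equiv track=rewrite | github.com/Matteo-Candi/Master-Thesis | results/test_01/test_01_formatted.py | cntRotations
-- ===== SOURCE A (Python) =====
-- def cntRotations(s, n):
--     s2 = s + s
--     pre = [0] * (2 * n)
--     for i in range(2 * n):
--         if i != 0:
--             pre[i] += pre[i - 1]
--         if s2[i] in ['a', 'e', 'i', 'o', 'u']:
--             pre[i] += 1
--     ans = 0
--     for i in range(n - 1, 2 * n - 1):
--         r = i
--         l = i - n
--         x1 = pre[r]
--         if l >= 0:
--             x1 -= pre[l]
--         r = i - n // 2
--         left = pre[r]
--         if l >= 0: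
--             left -= pre[l]
--         right = x1 - left
--         if left > right:
--             ans += 1
--     return ans
-- ===== SOURCE B (Python) =====
-- def cntRotations(s, n):
--     vowels = 'aeiou'
--     d = s + s
--     half = (n + 1) // 2
--     ans = 0
--     for k in range(n):
--         rot = d[k:k + n]
--         left = 0
--         for c in rot[:half]:
--             if c in vowels:
--                 left += 1
--         right = 0
--         for c in rot[half:]:
--             if c in vowels:
--                 right += 1
--         if left > right:
--             ans += 1
--     return ans
-- ===== Notes on version B (the rewrite author's own statement) =====
-- stated objective: simpler
-- what changed: Replaced A's prefix-sum table over s+s and O(1) window arithmetic with a direct per-rotation scan: build each rotation as a slice of s+s, count vowels in its two halves, compare.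
import Mathlib
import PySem

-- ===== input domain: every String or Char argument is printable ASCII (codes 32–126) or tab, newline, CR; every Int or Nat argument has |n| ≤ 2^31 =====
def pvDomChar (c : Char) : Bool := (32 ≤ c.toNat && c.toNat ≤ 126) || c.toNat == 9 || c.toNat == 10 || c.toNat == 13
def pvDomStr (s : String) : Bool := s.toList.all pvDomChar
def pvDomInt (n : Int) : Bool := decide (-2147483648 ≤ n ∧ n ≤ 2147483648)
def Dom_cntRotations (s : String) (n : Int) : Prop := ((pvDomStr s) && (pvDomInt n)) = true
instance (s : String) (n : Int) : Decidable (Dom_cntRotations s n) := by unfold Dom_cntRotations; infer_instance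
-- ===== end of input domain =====

-- B replaces A's prefix-sum table with a plain per-rotation scan of the two halves (simpler, not faster).

-- ===== PORT A =====
def cntRotations (s : String) (n : Int) : Int :=
  let s2 := s.toList ++ s.toList
  let pre := (PySem.List.pyRange 0 (2 * n) 1).foldl (fun pre i =>
      let pre := if i ≠ 0 then
          PySem.List.pySetD pre i (PySem.List.pyGetD pre i 0 + PySem.List.pyGetD pre (i - 1) 0)
        else pre
      if PySem.List.pyGetD s2 i ' ' ∈ (['a', 'e', 'i', 'o', 'u'] : List Char) then
        PySem.List.pySetD pre i (PySem.List.pyGetD pre i 0 + 1)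
      else pre)
    (List.replicate (2 * n).toNat (0 : Int))
  (PySem.List.pyRange (n - 1) (2 * n - 1) 1).foldl (fun ans i =>
      let r := i
      let l := i - n
      let x1 := PySem.List.pyGetD pre r 0
      let x1 := if l ≥ 0 then x1 - PySem.List.pyGetD pre l 0 else x1
      let r := i - PySem.Int.floordiv n 2
      let left := PySem.List.pyGetD pre r 0
      let left := if l ≥ 0 then left - PySem.List.pyGetD pre l 0 else left
      let right := x1 - left
      if left > right then ans + 1 else ans)
    0

-- ===== PORT B =====
def cntRotations_alt (s : String) (n : Int) : Int :=
  let d := s.toList ++ s.toList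
  let half := PySem.Int.floordiv (n + 1) 2
  (PySem.List.pyRange 0 n 1).foldl (fun ans k =>
      let rot := PySem.List.slice d (some k) (some (k + n))
      let left := (PySem.List.slice rot none (some half)).foldl
        (fun c ch => if ch ∈ "aeiou".toList then c + 1 else c) (0 : Int)
      let right := (PySem.List.slice rot (some half) none).foldl
        (fun c ch => if ch ∈ "aeiou".toList then c + 1 else c) (0 : Int)
      if left > right then ans + 1 else ans)
    0

-- ===== PRECONDITION & SPEC =====
-- Pre_ excludes exactly the inputs with n > len(s), on which A raises IndexError (s2[i] for i ≥ 2*len(s)).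
def Pre_cntRotations (s : String) (n : Int) : Prop := n ≤ (s.toList.length : Int)
instance (s : String) (n : Int) : Decidable (Pre_cntRotations s n) := by unfold Pre_cntRotations; infer_instance
def pvWitness_cntRotations : String × Int := ("aeb", 3)

def Spec_cntRotations (s : String) (n : Int) (out : Int) : Prop := out = cntRotations_alt s n
instance (s : String) (n : Int) (out : Int) : Decidable (Spec_cntRotations s n out) := by unfold Spec_cntRotations; infer_instance

-- ===== CLAIM (what is proved, stated in full; the proofs are below) =====
def Claim_equal_cntRotations : Prop := ∀ (s : String) (n : Int), Dom_cntRotations s n → Pre_cntRotations s n → Spec_cntRotations s n (cntRotations s n)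

-- ===== LEMMAS AND PROOFS =====


-- A Bool vowel test shared by the proofs (both ports test membership in the same five chars).
def pvVow (c : Char) : Bool := c ∈ (['a', 'e', 'i', 'o', 'u'] : List Char)

-- pvV d m = number of vowels among the first m characters of d (as an Int).
def pvV (d : List Char) (m : Nat) : Int := ((d.take m).countP pvVow : Nat)

-- One iteration of A's prefix-building loop, on Nat indices.
def pvStep (d : List Char) (pre : List Int) (k : Nat) : List Int :=
  let pre := if k ≠ 0 then pre.set k (pre.getD k 0 + pre.getD (k - 1) 0) else pre
  if pvVow (d.getD k ' ') then pre.set k (pre.getD k 0 + 1) else pre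

lemma pvGetD_set (l : List Int) (m j : Nat) (v : Int) (h : m < l.length) :
    (l.set m v).getD j 0 = if j = m then v else l.getD j 0 := by
  by_cases hj : j = m
  · subst hj; simp [List.getD, h]
  · simp [List.getD, List.getElem?_set_ne (by omega : m ≠ j), hj]

lemma pvV_zero (d : List Char) : pvV d 0 = 0 := by simp [pvV]

lemma pvV_succ (d : List Char) (m : Nat) (h : m < d.length) :
    pvV d (m + 1) = pvV d m + (if pvVow (d.getD m ' ') then 1 else 0) := by
  unfold pvV
  rw [List.take_add_one, List.getElem?_eq_getElem h]
  have hg : d.getD m ' ' = d[m] := by simp [List.getD, List.getElem?_eq_getElem h]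
  rw [hg, List.countP_append]
  by_cases hv : pvVow d[m] <;> simp [hv]

lemma pvV_add (d : List Char) (a m : Nat) :
    pvV d (a + m) = pvV d a + (((d.drop a).take m).countP pvVow : Nat) := by
  unfold pvV
  rw [List.take_add, List.countP_append]
  push_cast
  ring

-- Invariant of A's first loop: after m iterations, slot j holds the vowel count of d[:j+1] for j < m, else 0.
lemma pvPre_spec (d : List Char) (N : Nat) (hd : N ≤ d.length) :
    ∀ m, m ≤ N →
      ((List.range m).foldl (pvStep d) (List.replicate N 0)).length = N ∧
      ∀ j, j < N → ((List.range m).foldl (pvStep d) (List.replicate N 0)).getD j 0 =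
        if j < m then pvV d (j + 1) else 0 := by
  intro m
  induction m with
  | zero => intro _; simp [List.getD]
  | succ m ih =>
    intro hm
    obtain ⟨hlen, hval⟩ := ih (by omega)
    rw [List.range_succ, List.foldl_append, List.foldl_cons, List.foldl_nil]
    set pre := (List.range m).foldl (pvStep d) (List.replicate N 0) with hpre
    have hmN : m < N := by omega
    have hm0 : pre.getD m 0 = 0 := by rw [hval m hmN]; simp
    -- the list after the first conditional update
    set pre1 := if m ≠ 0 then pre.set m (pre.getD m 0 + pre.getD (m - 1) 0) else pre with hpre1
    have h1len : pre1.length = N := by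
      rw [hpre1]; split_ifs <;> simp [hlen]
    have h1m : pre1.getD m 0 = pvV d m := by
      by_cases h0 : m = 0
      · subst h0
        have he : pre1 = pre := by rw [hpre1]; simp
        rw [he, pvV_zero]
        exact hm0
      · rw [hpre1, if_pos h0]
        rw [pvGetD_set pre m m _ (by omega), if_pos rfl, hm0]
        rw [hval (m - 1) (by omega), if_pos (by omega : m - 1 < m)]
        have he : m - 1 + 1 = m := by omega
        rw [he]
        ring
    have h1j : ∀ j, j ≠ m → pre1.getD j 0 = pre.getD j 0 := by
      intro j hj
      rw [hpre1]
      split_ifs with h0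
      · rw [pvGetD_set pre m j _ (by omega), if_neg hj]
      · rfl
    show (pvStep d pre m).length = N ∧ _
    have hstep : pvStep d pre m =
        if pvVow (d.getD m ' ') then pre1.set m (pre1.getD m 0 + 1) else pre1 := by
      rw [pvStep, hpre1]
    constructor
    · rw [hstep]; split_ifs <;> simp [h1len]
    · intro j hj
      rw [hstep]
      by_cases hjm : j = m
      · subst hjm
        have hout := pvV_succ d j (by omega)
        by_cases hv : pvVow (d.getD j ' ') = true
        · rw [if_pos hv, pvGetD_set pre1 j j _ (by omega), if_pos rfl, h1m,
            if_pos (by omega : j < j + 1), hout, if_pos hv]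
        · rw [if_neg hv, h1m, if_pos (by omega : j < j + 1), hout, if_neg hv]
          ring
      · have hbase : pre1.getD j 0 = if j < m then pvV d (j + 1) else 0 := by
          rw [h1j j hjm, hval j hj]
        have hlt : (j < m + 1) ↔ (j < m) := by omega
        have hif : (if j < m + 1 then pvV d (j + 1) else 0) = if j < m then pvV d (j + 1) else 0 := by
          simp only [hlt]
        by_cases hv : pvVow (d.getD m ' ') = true
        · rw [if_pos hv, pvGetD_set pre1 m j _ (by omega), if_neg hjm, hbase]
          exact hif.symm
        · rw [if_neg hv, hbase]
          exact hif.symm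

lemma pvCount_fold (l : List Char) (a : Int) :
    l.foldl (fun c ch => if ch ∈ "aeiou".toList then c + 1 else c) a = a + ((l.countP pvVow : Nat) : Int) := by
  rw [PySem.List.foldl_congr_mem l _ (fun c ch => if pvVow ch then c + 1 else c) a ?_,
    PySem.List.foldl_count_if]
  intro acc x _
  simp [pvVow, show "aeiou".toList = ['a', 'e', 'i', 'o', 'u'] from rfl]

lemma pvWindow (d : List Char) (a m : Nat) :
    ((((d.drop a).take m).countP pvVow : Nat) : Int) = pvV d (a + m) - pvV d a := by
  rw [pvV_add]; ring

lemma pvMain (s : String) (n : Int) (hpre : n ≤ (s.toList.length : Int)) (hn : 1 ≤ n) :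
    cntRotations s n = cntRotations_alt s n := by
  have hn1 : n = (n.toNat : Int) := by omega
  set n' := n.toNat with hn'def
  have hn'1 : 1 ≤ n' := by omega
  simp only [cntRotations, cntRotations_alt]
  rw [hn1]
  set d := s.toList ++ s.toList with hd_def
  have hd2 : 2 * n' ≤ d.length := by
    have : d.length = s.toList.length + s.toList.length := by simp [hd_def]
    omega
  rw [PySem.List.pyRange_one 0 (2 * (n' : Int)),
    PySem.List.pyRange_one ((n' : Int) - 1) (2 * (n' : Int) - 1),
    PySem.List.pyRange_one 0 (n' : Int)]
  have ht1 : ((2 * (n' : Int)) - 0).toNat = 2 * n' := by omega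
  have ht2 : ((2 * (n' : Int) - 1) - ((n' : Int) - 1)).toNat = n' := by omega
  have ht3 : ((n' : Int) - 0).toNat = n' := by omega
  have hrep : (2 * (n' : Int)).toNat = 2 * n' := by omega
  rw [ht1, ht2, ht3, hrep]
  simp only [zero_add, List.foldl_map]
  -- the prefix fold is pvStep
  have hprefold :
      List.foldl (fun x (y : Nat) =>
        if PySem.List.pyGetD d (y : Int) ' ' ∈ (['a', 'e', 'i', 'o', 'u'] : List Char) then
          PySem.List.pySetD
            (if (y : Int) ≠ 0 then
              PySem.List.pySetD x (y : Int)
                (PySem.List.pyGetD x (y : Int) 0 + PySem.List.pyGetD x ((y : Int) - 1) 0)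
            else x)
            (y : Int)
            (PySem.List.pyGetD
                (if (y : Int) ≠ 0 then
                  PySem.List.pySetD x (y : Int)
                    (PySem.List.pyGetD x (y : Int) 0 + PySem.List.pyGetD x ((y : Int) - 1) 0)
                else x)
                (y : Int) 0 + 1)
        else
          if (y : Int) ≠ 0 then
            PySem.List.pySetD x (y : Int)
              (PySem.List.pyGetD x (y : Int) 0 + PySem.List.pyGetD x ((y : Int) - 1) 0)
          else x)
        (List.replicate (2 * n') (0 : Int)) (List.range (2 * n')) =
      List.foldl (pvStep d) (List.replicate (2 * n') (0 : Int)) (List.range (2 * n')) := by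
    apply PySem.List.foldl_congr_mem
    intro pre k _
    by_cases hk0 : k = 0
    · subst hk0
      simp [pvStep, pvVow, PySem.List.pyGetD_zero, PySem.List.pySetD_of_nonneg, List.getD]
    · have hc : ((k : Nat) : Int) - 1 = ((k - 1 : Nat) : Int) := by omega
      simp only [hc, PySem.List.pyGetD_natCast, PySem.List.pySetD_natCast,
        ne_eq, Nat.cast_eq_zero, hk0, not_false_iff, if_true]
      simp [pvStep, pvVow, hk0]
  rw [hprefold]
  obtain ⟨hplen, hpval⟩ := pvPre_spec d (2 * n') hd2 (2 * n') le_rfl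
  set P := List.foldl (pvStep d) (List.replicate (2 * n') (0 : Int)) (List.range (2 * n')) with hP
  -- compare the two counting folds elementwise
  apply PySem.List.foldl_congr_mem
  intro ans k hk
  have hkn : k < n' := List.mem_range.mp hk
  -- half sizes
  set h2 := (n' + 1) / 2 with hh2
  have hhalf : PySem.Int.floordiv ((n' : Int) + 1) 2 = (h2 : Int) := by
    rw [hh2]
    have h := PySem.Int.floordiv_natCast (n' + 1) 2
    push_cast at h
    exact h
  have hfd : PySem.Int.floordiv (n' : Int) 2 = ((n' / 2 : Nat) : Int) := by
    exact_mod_cast PySem.Int.floordiv_natCast n' 2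
  -- A-side values
  have hi1 : ((n' : Int) - 1 + (k : Int)) = ((n' - 1 + k : Nat) : Int) := by omega
  have hg1 : PySem.List.pyGetD P ((n' : Int) - 1 + (k : Int)) 0 = pvV d (n' + k) := by
    rw [hi1, PySem.List.pyGetD_natCast, hpval (n' - 1 + k) (by omega), if_pos (by omega)]
    congr 1
    omega
  have hi3 : ((n' : Int) - 1 + (k : Int) - PySem.Int.floordiv (n' : Int) 2) =
      ((n' - 1 + k - n' / 2 : Nat) : Int) := by
    rw [hfd]; omega
  have hg3 : PySem.List.pyGetD P ((n' : Int) - 1 + (k : Int) - PySem.Int.floordiv (n' : Int) 2) 0 =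
      pvV d (k + h2) := by
    rw [hi3, PySem.List.pyGetD_natCast, hpval (n' - 1 + k - n' / 2) (by omega), if_pos (by omega)]
    congr 1
    omega
  -- B-side values
  have hrot : PySem.List.slice d (some ((k : Nat) : Int)) (some (((k : Nat) : Int) + ((n' : Nat) : Int))) =
      (d.drop k).take n' := PySem.List.slice_natCast_add d k n'
  have hleftB : PySem.List.slice ((d.drop k).take n') none (some ((h2 : Nat) : Int)) = (d.drop k).take h2 := by
    rw [PySem.List.slice_to_natCast, List.take_take]
    congr 1
    omega
  have hrightB : PySem.List.slice ((d.drop k).take n') (some ((h2 : Nat) : Int)) none =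
      (d.drop (k + h2)).take (n' - h2) := by
    rw [PySem.List.slice_from_natCast, List.drop_take, List.drop_drop]
  rw [hg1, hg3, hhalf, hrot, hleftB, hrightB, pvCount_fold, pvCount_fold, zero_add, zero_add,
    pvWindow, pvWindow]
  have hsum : k + h2 + (n' - h2) = k + n' := by omega
  rw [hsum]
  -- resolve the l >= 0 tests and conclude
  by_cases hk0 : k = 0
  · subst hk0
    rw [if_neg (by omega : ¬ ((n' : Int) - 1 + ((0 : Nat) : Int) - (n' : Int) ≥ 0)),
      if_neg (by omega : ¬ ((n' : Int) - 1 + ((0 : Nat) : Int) - (n' : Int) ≥ 0))]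
    apply if_congr _ rfl rfl
    rw [pvV_zero d, show (n' + 0 : Nat) = 0 + n' from by omega]
    constructor <;> intro <;> linarith
  · have hl : ((n' : Int) - 1 + (k : Int) - (n' : Int)) ≥ 0 := by omega
    rw [if_pos hl, if_pos hl]
    have hi2 : ((n' : Int) - 1 + (k : Int) - (n' : Int)) = ((k - 1 : Nat) : Int) := by omega
    have hg2 : PySem.List.pyGetD P ((n' : Int) - 1 + (k : Int) - (n' : Int)) 0 = pvV d k := by
      rw [hi2, PySem.List.pyGetD_natCast, hpval (k - 1) (by omega), if_pos (by omega)]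
      congr 1
      omega
    rw [hg2]
    apply if_congr _ rfl rfl
    have e2 : (n' + k : Nat) = (k + n' : Nat) := by omega
    rw [e2]
    constructor <;> intro <;> linarith

-- ===== VERDICT (by name: the statement is the Claim_ definition above) =====
theorem cntRotations_spec : Claim_equal_cntRotations := by
  intro s n _ hpre
  unfold Spec_cntRotations
  by_cases hn : n ≤ 0
  · simp only [cntRotations, cntRotations_alt,
      PySem.List.pyRange_one_eq_nil (show (2 * n - 1 : Int) ≤ n - 1 from by omega),
      PySem.List.pyRange_one_eq_nil (show n ≤ (0 : Int) from by omega), List.foldl_nil]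
  · exact pvMain s n hpre (by omega)
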